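-- pv_equiv track=rewrite | github.com/need-singularity/sylvian-singularity | .shared/calc/topos_divisor_analysis.py | sieves_per_object
-- ===== SOURCE A (Python) =====
-- import itertools
--
-- def sieves_per_object(objs):
--     """For each object c in Div(n), compute Ω(c) = sieves on c.
--     A sieve on c = downward-closed subset of ↓c = {a : a|c}.
--     """
--     result = {}
--     for c in objs:
--         down_c = [a for a in objs if c % a == 0]
--         # Downward-closed subsets of ↓c
--         sieves = []
--         for r in range(len(down_c) + 1):
--             for subset in itertools.combinations(down_c, r):
--                 s = set(subset)
--                 is_dc = True
--                 for b in s: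
--                     for a in down_c:
--                         if b % a == 0 and a not in s:
--                             is_dc = False
--                             break
--                     if not is_dc:
--                         break
--                 if is_dc:
--                     sieves.append(s)
--         result[c] = sieves
--     return result
-- ===== SOURCE B (Python) =====
-- def sieves_per_object(objs):
--     """For each object c in Div(n), compute Ω(c) = sieves on c.
--     A sieve on c = downward-closed subset of ↓c = {a : a|c}.
--     """
--     result = {}
--     cache = {}
--     for c in objs:
--         if c not in cache:
--             down = [a for a in objs if c % a == 0]
--             n = len(down)
--
--             # Backtracking over positions: only feasible prefixes are extended
--             # (a pending divisor requirement must be satisfiable by the current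
--             # image or the remaining suffix), so invalid subsets are never built.
--             def dfs(i, chosen, image):
--                 if i == n:
--                     return [chosen]
--                 v = down[i]
--                 rest = down[i + 1:]
--                 out = []
--                 if all(a in image or a == v or a in rest
--                        for a in down if v % a == 0):
--                     out += dfs(i + 1, chosen + [i], image | {v})
--                 if v in image or v in rest or not any(down[j] % v == 0 for j in chosen):
--                     out += dfs(i + 1, chosen, image)
--                 return out
--
--             found = sorted(dfs(0, [], set()), key=lambda t: (len(t),) + tuple(t))
--             cache[c] = [set(down[i] for i in t) for t in found]
--         result[c] = cache[c]
--     return result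
-- ===== Notes on version B (the rewrite author's own statement) =====
-- stated objective: alternative
-- what changed: B replaces A's generate-all-subsets-and-test enumeration by a backtracking search over positions with feasibility pruning (a prefix is extended only if every pending divisor requirement can still be met by the current image or the remaining suffix), sorts the found sieves once into A's (size, lex) order, and caches the sieve list per distinct object instead of recomputing it for duplicates.
import Mathlib
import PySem

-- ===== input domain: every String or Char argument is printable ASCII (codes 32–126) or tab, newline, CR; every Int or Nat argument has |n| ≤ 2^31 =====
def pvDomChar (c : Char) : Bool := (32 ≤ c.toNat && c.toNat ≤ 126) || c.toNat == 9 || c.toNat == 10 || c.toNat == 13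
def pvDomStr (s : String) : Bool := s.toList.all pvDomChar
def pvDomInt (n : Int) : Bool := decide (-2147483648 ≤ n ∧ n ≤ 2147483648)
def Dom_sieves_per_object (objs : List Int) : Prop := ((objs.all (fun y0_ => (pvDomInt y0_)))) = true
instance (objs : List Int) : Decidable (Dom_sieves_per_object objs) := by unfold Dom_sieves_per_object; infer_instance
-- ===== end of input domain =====

-- B replaces A's generate-all-subsets-and-test enumeration by a backtracking search over
-- positions with feasibility pruning (only prefixes whose pending divisor requirements are
-- still satisfiable are extended), then one sort into A's (size, lex) order
-- (objective: alternative — only downward-closed subsets are ever materialized).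

-- ===== PORT A =====
-- down ↦ [a for a in objs if c % a == 0]  (this comprehension is shared verbatim by both Pythons)
def divisorsIn (objs : List Int) (c : Int) : List Int :=
  objs.filter (fun a => PySem.Int.mod c a == 0)

-- A's doubly-nested is_dc/break loop computes exactly this conjunction over s × down
def dcA (down : List Int) (s : PySem.Set Int) : Bool :=
  s.all (fun b => down.all (fun a => !(PySem.Int.mod b a == 0 && !(PySem.Set.contains s a))))

def sievesA (down : List Int) : List (List Int) :=
  (PySem.List.pyRange 0 (PySem.List.len down + 1)).foldl
    (fun sieves r =>
      (PySem.List.combinations down r.toNat).foldl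
        (fun sieves subset =>
          let s := PySem.Set.ofList subset
          if dcA down s then sieves ++ [s] else sieves)
        sieves)
    []

def sieves_per_object (objs : List Int) : List (Int × List (List Int)) :=
  (objs.foldl
    (fun (result : PySem.Dict Int (List (List Int))) c =>
      result.insert c (sievesA (divisorsIn objs c)))
    PySem.Dict.empty).items

-- ===== PORT B =====
-- def dfs(i, chosen, image): … — include-branch first, then skip-branch, as in Source B
def dfsB (down : List Int) (i : Nat) (chosen : List Int) (image : PySem.Set Int) :
    List (List Int) :=
  if h : i < down.length then
    let v := PySem.List.pyGetD down (i : Int) 0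
    let rest := PySem.List.slice down (some ((i : Int) + 1)) none
    (if down.all (fun a => !(PySem.Int.mod v a == 0) ||
          (PySem.Set.contains image a || a == v || rest.contains a)) then
        dfsB down (i + 1) (chosen ++ [(i : Int)]) (PySem.Set.union image (PySem.Set.ofList [v]))
      else []) ++
    (if PySem.Set.contains image v || rest.contains v ||
          !(chosen.any (fun j => PySem.Int.mod (PySem.List.pyGetD down j 0) v == 0)) then
        dfsB down (i + 1) chosen image
      else [])
  else [chosen]
termination_by down.length - i

def sievesB (down : List Int) : List (List Int) :=
  let found := PySem.List.sorted (dfsB down 0 [] PySem.Set.empty)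
    (fun t => PySem.List.len t :: t)   -- sorted(…, key=lambda t: (len(t),)+tuple(t))
  found.map (fun t => PySem.Set.ofList (t.map (fun i => PySem.List.pyGetD down i 0)))

-- result/cache pair: 'if c not in cache: cache[c] = …' then 'result[c] = cache[c]'
def sieves_per_object_alt (objs : List Int) : List (Int × List (List Int)) :=
  ((objs.foldl
    (fun (st : PySem.Dict Int (List (List Int)) × PySem.Dict Int (List (List Int))) c =>
      let cache' := if st.2.contains c then st.2
        else st.2.insert c (sievesB (divisorsIn objs c))
      (st.1.insert c (cache'.getD c []), cache'))
    (PySem.Dict.empty, PySem.Dict.empty)).1).items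

-- ===== PRECONDITION & SPEC =====
-- Pre_ excludes exactly the inputs containing 0: there Python's 'c % a' raises ZeroDivisionError (in both A and B).
def Pre_sieves_per_object (objs : List Int) : Prop := (0 : Int) ∉ objs
instance (objs : List Int) : Decidable (Pre_sieves_per_object objs) := by
  unfold Pre_sieves_per_object; infer_instance

def pvWitness_sieves_per_object : List Int := [1, 2, 4]

def Spec_sieves_per_object (objs : List Int) (out : List (Int × List (List Int))) : Prop :=
  out = sieves_per_object_alt objs
instance (objs : List Int) (out : List (Int × List (List Int))) : Decidable (Spec_sieves_per_object objs out) := by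
  unfold Spec_sieves_per_object; infer_instance

-- ===== CLAIM (what is proved, stated in full; the proofs are below) =====
def Claim_equal_sieves_per_object : Prop :=
  ∀ (objs : List Int), Dom_sieves_per_object objs → Pre_sieves_per_object objs →
    Spec_sieves_per_object objs (sieves_per_object objs)

-- ===== LEMMAS AND PROOFS =====

-- value at index j (all indices used are in range)
def getV (down : List Int) (j : Int) : Int := PySem.List.pyGetD down j 0
def mapGet (down : List Int) (t : List Int) : List Int := t.map (getV down)

-- semantic downward-closedness of the value image of an index list
def Valid (down : List Int) (t : List Int) : Prop :=
  ∀ b ∈ mapGet down t, ∀ a ∈ down, PySem.Int.mod b a = 0 → a ∈ mapGet down t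

def idxs (down : List Int) : List Int := (List.range down.length).map (Nat.cast : Nat → Int)

-- dcA on the image set is exactly Valid
theorem dcA_iff (down t : List Int) :
    dcA down (PySem.Set.ofList (mapGet down t)) = true ↔ Valid down t := by
  simp only [dcA, Valid, List.all_eq_true, Bool.not_eq_true', Bool.and_eq_false_iff,
    Bool.not_eq_false', PySem.Set.contains_iff, PySem.Set.mem_ofList, beq_eq_false_iff_ne]
  constructor
  · intro h b hb a ha hmod
    rcases h b hb a ha with h1 | h2
    · exact absurd hmod h1
    · exact h2
  · intro h b hb a ha
    by_cases hmod : PySem.Int.mod b a = 0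
    · exact Or.inr (h b hb a ha hmod)
    · exact Or.inl hmod

-- one unfolding of dfsB below the bound, with the slice and the indexings evaluated
theorem dfsB_eq_of_lt (down : List Int) (i : Nat) (chosen : List Int) (image : PySem.Set Int)
    (h : i < down.length) :
    dfsB down i chosen image =
      (if down.all (fun a => !(PySem.Int.mod down[i] a == 0) ||
            (PySem.Set.contains image a || a == down[i] || (down.drop (i + 1)).contains a)) then
          dfsB down (i + 1) (chosen ++ [(i : Int)])
            (PySem.Set.union image (PySem.Set.ofList [down[i]]))
        else []) ++
      (if PySem.Set.contains image down[i] || (down.drop (i + 1)).contains down[i] ||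
            !(chosen.any (fun j => PySem.Int.mod (PySem.List.pyGetD down j 0) down[i] == 0)) then
          dfsB down (i + 1) chosen image
        else []) := by
  have hv : PySem.List.pyGetD down (i : Int) 0 = down[i] := by
    rw [PySem.List.pyGetD_natCast, List.getD_eq_getElem _ _ h]
  have hr : PySem.List.slice down (some ((i : Int) + 1)) none = down.drop (i + 1) := by
    rw [show ((i : Int) + 1) = ((i + 1 : Nat) : Int) by push_cast; ring,
      PySem.List.slice_from_natCast]
  rw [dfsB, dif_pos h]
  simp only [hv, hr]

theorem union_singleton_mem (s : PySem.Set Int) (v a : Int) :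
    PySem.Set.contains (PySem.Set.union s (PySem.Set.ofList [v])) a = true ↔
      PySem.Set.contains s a = true ∨ a = v := by
  have h : PySem.Set.union s (PySem.Set.ofList [v]) = PySem.Set.add s v := rfl
  rw [h]
  simp [PySem.Set.mem_add]

-- the DFS with feasibility pruning returns exactly the valid extensions of `chosen`, without repetition
theorem dfsB_spec (down : List Int) : ∀ (m i : Nat) (chosen : List Int) (image : PySem.Set Int),
    down.length - i = m → i ≤ down.length →
    chosen.Sublist ((List.range i).map (Nat.cast : Nat → Int)) →
    (∀ a, PySem.Set.contains image a = true ↔ a ∈ mapGet down chosen) →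
    (∀ b ∈ mapGet down chosen, ∀ a ∈ down, PySem.Int.mod b a = 0 →
        a ∈ mapGet down chosen ∨ a ∈ down.drop i) →
    (∀ t, t ∈ dfsB down i chosen image ↔
        ∃ F, t = chosen ++ F ∧
          F.Sublist ((List.range' i (down.length - i)).map (Nat.cast : Nat → Int)) ∧
          Valid down t) ∧
      (dfsB down i chosen image).Nodup := by
  intro m
  induction m with
  | zero =>
    intro i chosen image hm hi hch him hC
    have hin : i = down.length := by omega
    rw [dfsB, dif_neg (by omega)]
    refine ⟨?_, List.nodup_singleton _⟩
    intro t
    simp only [List.mem_singleton]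
    constructor
    · rintro rfl
      refine ⟨[], by simp, by simp, ?_⟩
      intro b hb a ha hmod
      rcases hC b hb a ha hmod with h | h
      · exact h
      · rw [hin, List.drop_length] at h; simp at h
    · rintro ⟨F, rfl, hF, _⟩
      have hF0 : F = [] := by
        rw [show down.length - i = 0 by omega] at hF
        simpa using List.sublist_nil.1 (by simpa using hF)
      simp [hF0]
  | succ m ih =>
    intro i chosen image hm hi hch him hC
    have hlt : i < down.length := by omega
    set v := down[i] with hv
    have hvdown : v ∈ down := List.getElem_mem hlt
    have hvS : getV down ((i : Nat) : Int) = v := by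
      rw [getV, PySem.List.pyGetD_natCast, List.getD_eq_getElem _ _ hlt]
    have hdropi : down.drop i = v :: down.drop (i + 1) := List.drop_eq_getElem_cons hlt
    have hsfx : ((List.range' i (down.length - i)).map (Nat.cast : Nat → Int)) =
        ((i : Nat) : Int) :: ((List.range' (i + 1) (down.length - (i + 1))).map
          (Nat.cast : Nat → Int)) := by
      rw [show down.length - i = (down.length - (i + 1)) + 1 by omega, List.range'_succ,
        List.map_cons]
    -- a value indexed from the tail-index list lies in the tail of down
    have hmemtail : ∀ (F : List Int),
        F.Sublist ((List.range' (i + 1) (down.length - (i + 1))).map (Nat.cast : Nat → Int)) →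
        ∀ a ∈ mapGet down F, a ∈ down.drop (i + 1) := by
      intro F hF a ha
      rcases List.mem_map.1 ha with ⟨j, hj, rfl⟩
      have hj' := hF.subset hj
      rcases List.mem_map.1 hj' with ⟨k, hk, rfl⟩
      have hk' := List.mem_range'_1.1 hk
      have hkn : k < down.length := by omega
      have : getV down ((k : Nat) : Int) = down[k] := by
        rw [getV, PySem.List.pyGetD_natCast, List.getD_eq_getElem _ _ hkn]
      rw [this]
      have hgd : (down.drop (i + 1))[k - (i + 1)]'(by
          rw [List.length_drop]; omega) = down[k] := by
        rw [List.getElem_drop]; congr 1; omega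
      rw [← hgd]
      exact List.getElem_mem _
    -- INCLUDE branch characterization
    have hinc : ∀ t, (t ∈ (if down.all (fun a => !(PySem.Int.mod v a == 0) ||
            (PySem.Set.contains image a || a == v || (down.drop (i + 1)).contains a)) then
          dfsB down (i + 1) (chosen ++ [(i : Int)])
            (PySem.Set.union image (PySem.Set.ofList [v]))
        else []) ↔
        ∃ F, t = chosen ++ (((i : Nat) : Int) :: F) ∧
          F.Sublist ((List.range' (i + 1) (down.length - (i + 1))).map (Nat.cast : Nat → Int)) ∧
          Valid down t) ∧
        (if down.all (fun a => !(PySem.Int.mod v a == 0) ||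
            (PySem.Set.contains image a || a == v || (down.drop (i + 1)).contains a)) then
          dfsB down (i + 1) (chosen ++ [(i : Int)])
            (PySem.Set.union image (PySem.Set.ofList [v]))
        else []).Nodup := by
      have hg1sem : (down.all (fun a => !(PySem.Int.mod v a == 0) ||
            (PySem.Set.contains image a || a == v || (down.drop (i + 1)).contains a))) = true ↔
          ∀ a ∈ down, PySem.Int.mod v a = 0 →
            (a ∈ mapGet down chosen ∨ a = v ∨ a ∈ down.drop (i + 1)) := by
        simp only [List.all_eq_true, Bool.or_eq_true, Bool.not_eq_true', beq_iff_eq,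
          beq_eq_false_iff_ne, List.contains_iff_mem, him]
        constructor
        · intro h a ha hmod
          rcases h a ha with h' | h'
          · exact absurd hmod h'
          · tauto
        · intro h a ha
          by_cases hmod : PySem.Int.mod v a = 0
          · have := h a ha hmod; tauto
          · exact Or.inl hmod
      by_cases hg : (down.all (fun a => !(PySem.Int.mod v a == 0) ||
          (PySem.Set.contains image a || a == v || (down.drop (i + 1)).contains a))) = true
      · rw [if_pos hg]
        have hg1 := hg1sem.1 hg
        have hch' : (chosen ++ [(i : Int)]).Sublist
            ((List.range (i + 1)).map (Nat.cast : Nat → Int)) := by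
          rw [List.range_succ, List.map_append]
          exact hch.append (List.Sublist.refl _)
        have hmapc : mapGet down (chosen ++ [(i : Int)]) = mapGet down chosen ++ [v] := by
          simp only [mapGet, List.map_append, List.map_cons, List.map_nil, hvS]
        have him' : ∀ a, PySem.Set.contains (PySem.Set.union image (PySem.Set.ofList [v])) a
            = true ↔ a ∈ mapGet down (chosen ++ [(i : Int)]) := by
          intro a
          rw [union_singleton_mem, him, hmapc]
          simp
        have hC' : ∀ b ∈ mapGet down (chosen ++ [(i : Int)]), ∀ a ∈ down,
            PySem.Int.mod b a = 0 →
            a ∈ mapGet down (chosen ++ [(i : Int)]) ∨ a ∈ down.drop (i + 1) := by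
          rw [hmapc]
          intro b hb a ha hmod
          rcases List.mem_append.1 hb with hb | hb
          · rcases hC b hb a ha hmod with h | h
            · exact Or.inl (List.mem_append.2 (Or.inl h))
            · rw [hdropi] at h
              rcases List.mem_cons.1 h with rfl | h
              · exact Or.inl (List.mem_append.2 (Or.inr (List.mem_singleton.2 rfl)))
              · exact Or.inr h
          · have hbv : b = v := by simpa using hb
            subst hbv
            rcases hg1 a ha hmod with h | h | h
            · exact Or.inl (List.mem_append.2 (Or.inl h))
            · exact Or.inl (List.mem_append.2 (Or.inr (List.mem_singleton.2 h)))
            · exact Or.inr h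
        have hih := ih (i + 1) (chosen ++ [(i : Int)])
          (PySem.Set.union image (PySem.Set.ofList [v])) (by omega) (by omega) hch' him' hC'
        intro t
        refine ⟨?_, hih.2⟩
        rw [hih.1 t]
        constructor
        · rintro ⟨F, rfl, hF, hval⟩
          exact ⟨F, by rw [List.append_assoc, List.singleton_append], hF, hval⟩
        · rintro ⟨F, heq, hF, hval⟩
          exact ⟨F, by rw [heq, List.append_assoc, List.singleton_append], hF, hval⟩
      · rw [if_neg hg]
        intro t
        refine ⟨?_, List.nodup_nil⟩
        simp only [List.not_mem_nil, false_iff]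
        rintro ⟨F, rfl, hF, hval⟩
        apply hg
        rw [hg1sem]
        intro a ha hmod
        have hvt : v ∈ mapGet down (chosen ++ (((i : Nat) : Int) :: F)) := by
          simp only [mapGet, List.map_append, List.map_cons, hvS]
          exact List.mem_append.2 (Or.inr (List.mem_cons_self ..))
        have hat := hval v hvt a ha hmod
        simp only [mapGet, List.map_append, List.map_cons, hvS] at hat
        rcases List.mem_append.1 hat with h | h
        · exact Or.inl h
        · rcases List.mem_cons.1 h with rfl | h
          · exact Or.inr (Or.inl rfl)
          · exact Or.inr (Or.inr (hmemtail F hF a h))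
    -- SKIP branch characterization
    have hskip : ∀ t, (t ∈ (if PySem.Set.contains image v || (down.drop (i + 1)).contains v ||
            !(chosen.any (fun j => PySem.Int.mod (PySem.List.pyGetD down j 0) v == 0)) then
          dfsB down (i + 1) chosen image
        else []) ↔
        ∃ F, t = chosen ++ F ∧
          F.Sublist ((List.range' (i + 1) (down.length - (i + 1))).map (Nat.cast : Nat → Int)) ∧
          Valid down t) ∧
        (if PySem.Set.contains image v || (down.drop (i + 1)).contains v ||
            !(chosen.any (fun j => PySem.Int.mod (PySem.List.pyGetD down j 0) v == 0)) then
          dfsB down (i + 1) chosen image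
        else []).Nodup := by
      have hg2sem : (PySem.Set.contains image v || (down.drop (i + 1)).contains v ||
            !(chosen.any (fun j => PySem.Int.mod (PySem.List.pyGetD down j 0) v == 0))) = true ↔
          (v ∈ mapGet down chosen ∨ v ∈ down.drop (i + 1) ∨
            ∀ j ∈ chosen, ¬ PySem.Int.mod (getV down j) v = 0) := by
        simp only [Bool.or_eq_true, Bool.not_eq_true', List.any_eq_false, beq_iff_eq,
          List.contains_iff_mem, him, getV]
        tauto
      by_cases hg : (PySem.Set.contains image v || (down.drop (i + 1)).contains v ||
          !(chosen.any (fun j => PySem.Int.mod (PySem.List.pyGetD down j 0) v == 0))) = true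
      · rw [if_pos hg]
        have hg2 := hg2sem.1 hg
        have hch2 : chosen.Sublist ((List.range (i + 1)).map (Nat.cast : Nat → Int)) := by
          refine hch.trans ?_
          rw [List.range_succ, List.map_append]
          exact List.sublist_append_left _ _
        have hC2 : ∀ b ∈ mapGet down chosen, ∀ a ∈ down, PySem.Int.mod b a = 0 →
            a ∈ mapGet down chosen ∨ a ∈ down.drop (i + 1) := by
          intro b hb a ha hmod
          rcases hC b hb a ha hmod with h | h
          · exact Or.inl h
          · rw [hdropi] at h
            rcases List.mem_cons.1 h with rfl | h
            · rcases hg2 with h2 | h2 | h2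
              · exact Or.inl h2
              · exact Or.inr h2
              · rcases List.mem_map.1 hb with ⟨j, hj, rfl⟩
                exact absurd hmod (h2 j hj)
            · exact Or.inr h
        have hih := ih (i + 1) chosen image (by omega) (by omega) hch2 him hC2
        intro t
        exact ⟨hih.1 t, hih.2⟩
      · rw [if_neg hg]
        intro t
        refine ⟨?_, List.nodup_nil⟩
        simp only [List.not_mem_nil, false_iff]
        rintro ⟨F, rfl, hF, hval⟩
        apply hg
        rw [hg2sem]
        by_cases h1 : v ∈ mapGet down chosen
        · exact Or.inl h1
        by_cases h2 : v ∈ down.drop (i + 1)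
        · exact Or.inr (Or.inl h2)
        refine Or.inr (Or.inr ?_)
        intro j hj hmod0
        have hb : getV down j ∈ mapGet down (chosen ++ F) := by
          simp only [mapGet, List.map_append]
          exact List.mem_append.2 (Or.inl (List.mem_map.2 ⟨j, hj, rfl⟩))
        have hvmem := hval _ hb v hvdown hmod0
        simp only [mapGet, List.map_append] at hvmem
        rcases List.mem_append.1 hvmem with h | h
        · exact h1 h
        · exact h2 (hmemtail F hF v h)
    rw [dfsB_eq_of_lt down i chosen image hlt, ← hv]
    constructor
    · intro t
      rw [List.mem_append, (hinc t).1, (hskip t).1]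
      constructor
      · rintro (⟨F, rfl, hF, hval⟩ | ⟨F, rfl, hF, hval⟩)
        · exact ⟨((i : Nat) : Int) :: F, rfl, by rw [hsfx]; exact hF.cons₂ _, hval⟩
        · exact ⟨F, rfl, by rw [hsfx]; exact hF.cons _, hval⟩
      · rintro ⟨F, rfl, hF, hval⟩
        rw [hsfx] at hF
        rcases List.sublist_cons_iff.1 hF with hF' | ⟨F', rfl, hF'⟩
        · exact Or.inr ⟨F, rfl, hF', hval⟩
        · exact Or.inl ⟨F', rfl, hF', hval⟩
    · refine List.Nodup.append (hinc []).2 (hskip []).2 ?_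
      intro t ht1 ht2
      rcases ((hinc t).1).1 ht1 with ⟨F, rfl, hF, -⟩
      rcases ((hskip _).1).1 ht2 with ⟨F2, heq, hF2, -⟩
      have : ((i : Nat) : Int) :: F = F2 := List.append_cancel_left heq
      rw [← this] at hF2
      have : ((i : Nat) : Int) ∈ ((List.range' (i + 1) (down.length - (i + 1))).map
          (Nat.cast : Nat → Int)) := hF2.subset (List.mem_cons_self ..)
      rcases List.mem_map.1 this with ⟨k, hk, hki⟩
      have := List.mem_range'_1.1 hk
      have hki' : k = i := by exact_mod_cast hki
      omega

-- PySem.List.sorted: bridge between the elaborated DecidableLT instance on List Int keys and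
-- the one LinearOrder provides (their `<` are propositionally the same, so the sorts coincide)
theorem sorted_bridge (xs : List (List Int)) (key : List Int → List Int) :
    PySem.List.sorted xs key =
    @PySem.List.sorted (List Int) (List Int) List.instLinearOrder.toLT
      LinearOrder.toDecidableLT xs key false := by
  rw [PySem.List.sorted_eq_foldl_insertBy,
      @PySem.List.sorted_eq_foldl_insertBy _ _ List.instLinearOrder.toLT
        LinearOrder.toDecidableLT xs key]
  congr 1
  funext acc x
  congr 1
  funext a b
  exact decide_eq_decide.2 ⟨fun h => h, fun h => h⟩

-- combinations of a strictly increasing list are strictly lex-increasing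
theorem combos_pairwise_lt (xs : List Int) (h : xs.Pairwise (· < ·)) (r : Nat) :
    (PySem.List.combinations xs r).Pairwise (· < ·) := by
  induction xs generalizing r with
  | nil =>
    cases r with
    | zero => simp [PySem.List.combinations_zero]
    | succ r => simp [PySem.List.combinations_nil_succ]
  | cons x xs ih =>
    cases r with
    | zero => simp [PySem.List.combinations_zero]
    | succ r =>
      rw [PySem.List.combinations_cons_succ]
      rw [List.pairwise_append]
      refine ⟨?_, ih h.of_cons (r + 1), ?_⟩
      · rw [List.pairwise_map]
        exact (ih h.of_cons r).imp (fun hab => List.cons_lt_cons_iff.2 (Or.inr ⟨rfl, hab⟩))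
      · rintro a ha b hb
        rcases List.mem_map.1 ha with ⟨a', _, rfl⟩
        have hbs := PySem.List.mem_combinations_iff xs (r + 1) b |>.1 hb
        cases b with
        | nil => simp at hbs
        | cons y b' =>
          have hy : y ∈ xs := hbs.1.subset (List.mem_cons_self ..)
          have hxy : x < y := (List.pairwise_cons.1 h).1 y hy
          exact List.cons_lt_cons_iff.2 (Or.inl hxy)

theorem idxs_pairwise (down : List Int) : (idxs down).Pairwise (· < ·) := by
  rw [idxs, List.pairwise_map]
  exact List.pairwise_lt_range.imp (by exact_mod_cast fun h => h)

-- sievesA as one filtered flatMap over index combinations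
theorem sievesA_eq (down : List Int) :
    sievesA down =
      ((List.range (down.length + 1)).flatMap
        (fun r => (PySem.List.combinations (idxs down) r).filter
          (fun t => dcA down (PySem.Set.ofList (mapGet down t))))).map
        (fun t => PySem.Set.ofList (mapGet down t)) := by
  have hdown : (idxs down).map (getV down) = down := by
    have h0 := PySem.List.map_pyGetD_pyRange_zero down 0
    rw [PySem.List.len_eq, PySem.List.pyRange_zero_natCast] at h0
    simpa [idxs, getV, List.map_map] using h0
  have hinner : ∀ (r : Nat) (acc : List (List Int)),
      (PySem.List.combinations down r).foldl
        (fun sieves subset =>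
          let s := PySem.Set.ofList subset
          if dcA down s then sieves ++ [s] else sieves) acc =
      acc ++ ((PySem.List.combinations down r).filter
        (fun subset => dcA down (PySem.Set.ofList subset))).map PySem.Set.ofList := by
    intro r acc
    exact PySem.List.foldl_append_if (fun subset => dcA down (PySem.Set.ofList subset))
      PySem.Set.ofList (PySem.List.combinations down r) acc
  unfold sievesA
  rw [show PySem.List.len down + 1 = (((down.length + 1 : Nat)) : Int) by
    rw [PySem.List.len_eq]; push_cast; ring]
  rw [PySem.List.pyRange_zero_natCast, List.foldl_map]
  have hstep : (fun (sieves : List (PySem.Set Int)) (r : Nat) =>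
      (PySem.List.combinations down ((r : Int)).toNat).foldl
        (fun sieves subset =>
          let s := PySem.Set.ofList subset
          if dcA down s then sieves ++ [s] else sieves) sieves) =
      (fun sieves r => sieves ++ ((PySem.List.combinations down r).filter
        (fun subset => dcA down (PySem.Set.ofList subset))).map PySem.Set.ofList) := by
    funext sieves r
    rw [Int.toNat_natCast, hinner]
  rw [hstep, PySem.List.foldl_append_eq_flatMap, List.nil_append, List.map_flatMap]
  congr 1
  funext r
  have hc : PySem.List.combinations down r =
      (PySem.List.combinations (idxs down) r).map (List.map (getV down)) := by
    conv_lhs => rw [← hdown]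
    rw [PySem.List.combinations_map]
  rw [hc, List.filter_map, List.map_map]
  rfl

-- sievesB equals the same filtered flatMap
theorem sievesB_eq (down : List Int) :
    sievesB down =
      ((List.range (down.length + 1)).flatMap
        (fun r => (PySem.List.combinations (idxs down) r).filter
          (fun t => dcA down (PySem.Set.ofList (mapGet down t))))).map
        (fun t => PySem.Set.ofList (mapGet down t)) := by
  have hfull : ((List.range (down.length + 1)).flatMap
      (fun r => PySem.List.combinations (idxs down) r)).Pairwise
      (fun a b => (PySem.List.len a :: a : List Int) < PySem.List.len b :: b) := by
    rw [List.flatMap_def, List.pairwise_flatten]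
    constructor
    · intro l hl
      rcases List.mem_map.1 hl with ⟨r, _, rfl⟩
      refine (combos_pairwise_lt (idxs down) (idxs_pairwise down) r).imp_of_mem ?_
      intro a b ha hb hab
      have hla := PySem.List.length_of_mem_combinations ha
      have hlb := PySem.List.length_of_mem_combinations hb
      simp only [PySem.List.len]
      exact List.cons_lt_cons_iff.2 (Or.inr ⟨by rw [hla, hlb], hab⟩)
    · rw [List.pairwise_map]
      refine List.pairwise_lt_range.imp_of_mem ?_
      intro r1 r2 _ _ hr x hx y hy
      have hlx := PySem.List.length_of_mem_combinations hx
      have hly := PySem.List.length_of_mem_combinations hy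
      simp only [PySem.List.len]
      exact List.cons_lt_cons_iff.2 (Or.inl (by rw [hlx, hly]; exact_mod_cast hr))
  have hsub : ((List.range (down.length + 1)).flatMap
      (fun r => (PySem.List.combinations (idxs down) r).filter
        (fun t => dcA down (PySem.Set.ofList (mapGet down t))))).Sublist
      ((List.range (down.length + 1)).flatMap
        (fun r => PySem.List.combinations (idxs down) r)) := by
    induction List.range (down.length + 1) with
    | nil => simp
    | cons r rs ihr =>
      simp only [List.flatMap_cons]
      exact List.Sublist.append List.filter_sublist ihr
  have hLpw := hfull.sublist hsub
  have hLnd : ((List.range (down.length + 1)).flatMap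
      (fun r => (PySem.List.combinations (idxs down) r).filter
        (fun t => dcA down (PySem.Set.ofList (mapGet down t))))).Nodup := by
    refine hLpw.imp ?_
    intro a b hab
    rintro rfl
    exact lt_irrefl _ hab
  have him0 : ∀ a, PySem.Set.contains PySem.Set.empty a = true ↔ a ∈ mapGet down ([] : List Int) := by
    intro a
    simp [mapGet, PySem.Set.empty]
  have hspec := dfsB_spec down down.length 0 [] PySem.Set.empty (by omega) (by omega)
    (by simp) him0 (by simp [mapGet])
  have hidxs : ((List.range' 0 (down.length - 0)).map (Nat.cast : Nat → Int)) = idxs down := by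
    rw [Nat.sub_zero, ← List.range_eq_range', idxs]
  have hfmem : ∀ t, t ∈ dfsB down 0 [] PySem.Set.empty ↔
      (t.Sublist (idxs down) ∧ Valid down t) := by
    intro t
    rw [hspec.1 t]
    constructor
    · rintro ⟨F, rfl, hF, hval⟩
      rw [hidxs] at hF
      exact ⟨by simpa using hF, hval⟩
    · rintro ⟨hF, hval⟩
      exact ⟨t, by rw [List.nil_append], by rwa [hidxs], hval⟩
  have hLmem : ∀ t, t ∈ ((List.range (down.length + 1)).flatMap
      (fun r => (PySem.List.combinations (idxs down) r).filter
        (fun t => dcA down (PySem.Set.ofList (mapGet down t))))) ↔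
      (t.Sublist (idxs down) ∧ Valid down t) := by
    intro t
    simp only [List.mem_flatMap, List.mem_filter, PySem.List.mem_combinations_iff,
      List.mem_range]
    constructor
    · rintro ⟨r, hr, ⟨⟨hsl, _⟩, hdc⟩⟩
      exact ⟨hsl, (dcA_iff down t).1 hdc⟩
    · rintro ⟨hsl, hval⟩
      refine ⟨t.length, ?_, ⟨⟨hsl, rfl⟩, (dcA_iff down t).2 hval⟩⟩
      have := hsl.length_le
      rw [idxs, List.length_map, List.length_range] at this
      omega
  have hperm : ((List.range (down.length + 1)).flatMap
      (fun r => (PySem.List.combinations (idxs down) r).filter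
        (fun t => dcA down (PySem.Set.ofList (mapGet down t))))).Perm
      (dfsB down 0 [] PySem.Set.empty) := by
    rw [List.perm_ext_iff_of_nodup hLnd hspec.2]
    intro t
    rw [hLmem t, hfmem t]
  have hsorted : PySem.List.sorted (dfsB down 0 [] PySem.Set.empty)
      (fun t => PySem.List.len t :: t) =
      ((List.range (down.length + 1)).flatMap
        (fun r => (PySem.List.combinations (idxs down) r).filter
          (fun t => dcA down (PySem.Set.ofList (mapGet down t))))) := by
    rw [sorted_bridge]
    exact PySem.List.sorted_eq_of_perm_of_pairwise_lt _ _ (fun t => PySem.List.len t :: t)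
      hperm hLpw
  show (PySem.List.sorted (dfsB down 0 [] PySem.Set.empty)
      (fun t => PySem.List.len t :: t)).map
      (fun t => PySem.Set.ofList (t.map (fun i => PySem.List.pyGetD down i 0))) = _
  rw [hsorted]
  rfl

theorem sieves_eq (down : List Int) : sievesA down = sievesB down := by
  rw [sievesA_eq, sievesB_eq]

-- the cached fold computes, in its first component, the plain insert fold
theorem fold_cached (objs : List Int) : ∀ (l : List Int)
    (res cache : PySem.Dict Int (List (List Int))),
    (∀ k v, cache.get? k = some v → v = sievesB (divisorsIn objs k)) →
    (l.foldl
      (fun (st : PySem.Dict Int (List (List Int)) × PySem.Dict Int (List (List Int))) c =>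
        let cache' := if st.2.contains c then st.2
          else st.2.insert c (sievesB (divisorsIn objs c))
        (st.1.insert c (cache'.getD c []), cache'))
      (res, cache)).1 =
    l.foldl (fun r c => r.insert c (sievesB (divisorsIn objs c))) res := by
  intro l
  induction l with
  | nil => intro res cache _; rfl
  | cons c l ih =>
    intro res cache hinv
    simp only [List.foldl_cons]
    by_cases hc : cache.contains c = true
    · have hsome : (cache.get? c).isSome = true := by
        rw [← PySem.Dict.contains_eq_isSome_get?]; exact hc
      obtain ⟨v, hv⟩ := Option.isSome_iff_exists.1 hsome
      have hgd : cache.getD c [] = sievesB (divisorsIn objs c) := by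
        rw [PySem.Dict.getD_eq_get?_getD, hv, Option.getD_some]
        exact hinv c v hv
      simp only [hc, if_true]
      rw [hgd]
      exact ih _ _ hinv
    · have hc' : cache.contains c = false := by simpa using hc
      simp only [hc', Bool.false_eq_true, if_false]
      rw [PySem.Dict.getD_insert_self]
      apply ih
      intro k v hkv
      rw [PySem.Dict.get?_insert] at hkv
      by_cases hkc : k = c
      · rw [if_pos hkc] at hkv
        rw [hkc]
        exact (Option.some_inj.1 hkv).symm
      · rw [if_neg hkc] at hkv
        exact hinv k v hkv

-- ===== VERDICT (by name: the statement is the Claim_ definition above) =====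
theorem sieves_per_object_spec : Claim_equal_sieves_per_object := by
  intro objs _ _
  unfold Spec_sieves_per_object sieves_per_object sieves_per_object_alt
  rw [fold_cached objs objs PySem.Dict.empty PySem.Dict.empty
    (by intro k v h; rw [PySem.Dict.get?_empty] at h; cases h)]
  have h : (fun (result : PySem.Dict Int (List (List Int))) c =>
      result.insert c (sievesA (divisorsIn objs c))) =
      (fun (result : PySem.Dict Int (List (List Int))) c =>
      result.insert c (sievesB (divisorsIn objs c))) := by
    funext result c; rw [sieves_eq]
  rw [h]
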